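-- pv_equiv track=rewrite | github.com/cory-johannsen/darksun-pf2e | tools/pdf_pipeline/postprocessors/chapter_five_monsters_reconstruction.py | _split_merged_value
-- ===== SOURCE A (Python) =====
-- from typing import Dict, List, Tuple, Optional
--
-- VALID_VALUES = {
--     "CLIMATE/TERRAIN": [
--         "Any", "Tablelands", "Tablelands, Mountains, and Hinterlands",
--         "Any sandy region", "Sands, stony barrens, rocky badlands, and islands",
--         "Sea of Silt Islands, Tablelands", "Tablelands, Mountains",
--         "Tablelands and Hinterlands", "Badlands", "Tablelands and mountains"
--     ],
--     "FREQUENCY": ["Uncommon", "Rare", "Very Rare", "Unique"],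
--     "ORGANIZATION": ["Tribe", "Solitary", "Small Tribes", "Clans", "Tribal", "Family", "Pack"],
--     "ACTIVITY CYCLE": ["Night", "Any", "Day", "Day/Night", "Nocturnal"],
--     "DIET": ["Omnivore", "Carnivore"],
--     "ALIGNMENT": [
--         "Neutral evil", "Lawful evil", "Varies by individual",
--         "Chaotic", "Chaotic neutral", "Neutral"
--     ],
--     "MAGIC RESISTANCE": ["Nil"],  # Also "#%" patterns
-- }
--
-- def _split_merged_value(raw_value: str, current_field: str, next_field: str = None) -> Tuple[str, str]:
--     """
--     Split merged values using the line break reconstruction rule: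
--     "For rows with documented valid value ranges, any text that does NOT match
--     those valid values/patterns is NOT part of that row."
--
--     Args:
--         raw_value: The raw extracted value that may contain merged fields
--         current_field: The name of the current field (e.g., "CLIMATE/TERRAIN")
--         next_field: The name of the next field (e.g., "FREQUENCY")
--
--     Returns:
--         Tuple of (current_field_value, remaining_text)
--     """
--     if not raw_value:
--         return ("", "")
--
--     # Check if current field has known valid values
--     if current_field in VALID_VALUES:
--         valid_values = VALID_VALUES[current_field]
--
--         # Try to find the longest matching valid value from the start
--         best_match = ""
--         remaining = raw_value
--
--         # Sort by length descending to try longest matches first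
--         for valid_value in sorted(valid_values, key=len, reverse=True):
--             if raw_value.startswith(valid_value):
--                 # Found a valid match
--                 best_match = valid_value
--                 remaining = raw_value[len(valid_value):].strip()
--                 break
--
--         if best_match:
--             return (best_match, remaining)
--
--     # If no valid value list, try to detect boundary using next field's valid values
--     if next_field and next_field in VALID_VALUES:
--         next_valid_values = VALID_VALUES[next_field]
--
--         # Find where the next field's value starts
--         for valid_value in sorted(next_valid_values, key=len, reverse=True):
--             if valid_value in raw_value:
--                 idx = raw_value.index(valid_value)
--                 if idx > 0:
--                     # Split at the boundary
--                     current_value = raw_value[:idx].strip()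
--                     remaining = raw_value[idx:].strip()
--                     return (current_value, remaining)
--
--     # Default: return the whole value as-is
--     return (raw_value, "")
-- ===== SOURCE B (Python) =====
-- from typing import Dict, List, Tuple, Optional
--
-- VALID_VALUES = {
--     "CLIMATE/TERRAIN": [
--         "Any", "Tablelands", "Tablelands, Mountains, and Hinterlands",
--         "Any sandy region", "Sands, stony barrens, rocky badlands, and islands",
--         "Sea of Silt Islands, Tablelands", "Tablelands, Mountains",
--         "Tablelands and Hinterlands", "Badlands", "Tablelands and mountains"
--     ],
--     "FREQUENCY": ["Uncommon", "Rare", "Very Rare", "Unique"],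
--     "ORGANIZATION": ["Tribe", "Solitary", "Small Tribes", "Clans", "Tribal", "Family", "Pack"],
--     "ACTIVITY CYCLE": ["Night", "Any", "Day", "Day/Night", "Nocturnal"],
--     "DIET": ["Omnivore", "Carnivore"],
--     "ALIGNMENT": [
--         "Neutral evil", "Lawful evil", "Varies by individual",
--         "Chaotic", "Chaotic neutral", "Neutral"
--     ],
--     "MAGIC RESISTANCE": ["Nil"],
-- }
--
--
-- def _pick_longest(values, pred):
--     """One pass over `values` in list order: keep the first candidate of
--     maximal length among those satisfying `pred` (no sorting)."""
--     best = ""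
--     for v in values:
--         if pred(v) and len(v) > len(best):
--             best = v
--     return best
--
--
-- def _split_merged_value(raw_value: str, current_field: str, next_field: str = None) -> Tuple[str, str]:
--     if not raw_value:
--         return ("", "")
--
--     vals = VALID_VALUES.get(current_field)
--     if vals is not None:
--         best = _pick_longest(vals, raw_value.startswith)
--         if best:
--             return (best, raw_value[len(best):].strip())
--
--     if next_field and next_field in VALID_VALUES:
--         best = _pick_longest(VALID_VALUES[next_field],
--                              lambda v: v in raw_value and raw_value.index(v) > 0)
--         if best:
--             idx = raw_value.index(best)
--             return (raw_value[:idx].strip(), raw_value[idx:].strip())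
--
--     return (raw_value, "")
-- ===== Notes on version B (the rewrite author's own statement) =====
-- stated objective: simpler
-- what changed: A sorts the valid-value list by length (descending) on every call and scans for the first match; B never sorts: each phase is a single pass over the list in original order keeping the longest matching candidate (strict comparison preserves the first-of-equal-length tie-break), via one shared helper _pick_longest.
import Mathlib
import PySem

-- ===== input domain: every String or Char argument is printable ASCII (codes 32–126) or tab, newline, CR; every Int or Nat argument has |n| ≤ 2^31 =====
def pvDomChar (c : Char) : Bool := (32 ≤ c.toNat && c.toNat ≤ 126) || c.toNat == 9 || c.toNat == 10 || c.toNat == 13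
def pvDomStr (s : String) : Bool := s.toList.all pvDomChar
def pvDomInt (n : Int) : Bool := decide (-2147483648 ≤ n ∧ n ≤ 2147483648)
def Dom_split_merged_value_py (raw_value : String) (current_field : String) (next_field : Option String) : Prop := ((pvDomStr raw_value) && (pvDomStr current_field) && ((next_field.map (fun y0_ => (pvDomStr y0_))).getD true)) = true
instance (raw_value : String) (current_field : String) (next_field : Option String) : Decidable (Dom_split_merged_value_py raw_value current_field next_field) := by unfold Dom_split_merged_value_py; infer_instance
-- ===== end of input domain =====

-- B replaces A's sort-then-first-match scans by single no-sort passes keeping the longest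
-- matching candidate (objective: simpler — no sorting, one fold per phase).

-- The module constant VALID_VALUES (shared by both programs).
def pvVV : PySem.Dict String (List String) := PySem.Dict.mk [
  ("CLIMATE/TERRAIN", ["Any", "Tablelands", "Tablelands, Mountains, and Hinterlands",
      "Any sandy region", "Sands, stony barrens, rocky badlands, and islands",
      "Sea of Silt Islands, Tablelands", "Tablelands, Mountains",
      "Tablelands and Hinterlands", "Badlands", "Tablelands and mountains"]),
  ("FREQUENCY", ["Uncommon", "Rare", "Very Rare", "Unique"]),
  ("ORGANIZATION", ["Tribe", "Solitary", "Small Tribes", "Clans", "Tribal", "Family", "Pack"]),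
  ("ACTIVITY CYCLE", ["Night", "Any", "Day", "Day/Night", "Nocturnal"]),
  ("DIET", ["Omnivore", "Carnivore"]),
  ("ALIGNMENT", ["Neutral evil", "Lawful evil", "Varies by individual",
      "Chaotic", "Chaotic neutral", "Neutral"]),
  ("MAGIC RESISTANCE", ["Nil"])]

-- ===== PORT A =====
-- A's phase-1 loop body: walk the (descending-by-len sorted) list, break at the first
-- valid_value that raw_value startswith; state (best_match, remaining) with base ("", raw).
def pvLoop1A (raw : String) : List String → String × String
  | [] => ("", raw)
  | v :: vs =>
      if PySem.Str.startswith raw v then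
        (v, PySem.Str.strip (PySem.Str.slice raw (some (PySem.Str.len v)) none))
      else pvLoop1A raw vs

-- A's phase-2 loop: first valid_value (in sorted order) contained in raw_value at index > 0;
-- base case is the function's fall-through default (raw_value, "").
def pvLoop2A (raw : String) : List String → String × String
  | [] => (raw, "")
  | v :: vs =>
      if PySem.Str.isIn v raw then
        if PySem.Str.find raw v > 0 then
          (PySem.Str.strip (PySem.Str.slice raw none (some (PySem.Str.find raw v))),
           PySem.Str.strip (PySem.Str.slice raw (some (PySem.Str.find raw v)) none))
        else pvLoop2A raw vs
      else pvLoop2A raw vs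

-- A's lines from "if next_field and next_field in VALID_VALUES:" to the final default.
def pvDetectA (raw : String) (nf : Option String) : String × String :=
  match nf with
  | some nfv =>
      if nfv ≠ "" then
        match PySem.Dict.get? pvVV nfv with
        | some nvals => pvLoop2A raw (PySem.List.sorted nvals (fun v => PySem.Str.len v) true)
        | none => (raw, "")
      else (raw, "")
  | none => (raw, "")

def split_merged_value_py (raw_value : String) (current_field : String) (next_field : Option String) : String × String :=
  if raw_value = "" then ("", "")
  else
    match PySem.Dict.get? pvVV current_field with
    | some valid_values =>
        let r := pvLoop1A raw_value (PySem.List.sorted valid_values (fun v => PySem.Str.len v) true)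
        if r.1 ≠ "" then r else pvDetectA raw_value next_field
    | none => pvDetectA raw_value next_field

-- ===== PORT B =====
-- B's helper _pick_longest: one pass in original list order, keep the first candidate of
-- strictly maximal length among those satisfying pred (no sorting).
def pvPick (p : String → Bool) : List String → String → String
  | [], best => best
  | v :: vs, best =>
      pvPick p vs (if p v && decide (PySem.Str.len best < PySem.Str.len v) then v else best)

-- B's second block: boundary detection via the next field's valid values.
def pvDetectB (raw : String) (nf : Option String) : String × String :=
  match nf with
  | some nfv =>
      if nfv ≠ "" then
        match PySem.Dict.get? pvVV nfv with
        | some nvals =>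
            let b := pvPick (fun v => PySem.Str.isIn v raw && decide (PySem.Str.find raw v > 0)) nvals ""
            if b ≠ "" then
              (PySem.Str.strip (PySem.Str.slice raw none (some (PySem.Str.find raw b))),
               PySem.Str.strip (PySem.Str.slice raw (some (PySem.Str.find raw b)) none))
            else (raw, "")
        | none => (raw, "")
      else (raw, "")
  | none => (raw, "")

def split_merged_value_py_alt (raw_value : String) (current_field : String) (next_field : Option String) : String × String :=
  if raw_value = "" then ("", "")
  else
    match PySem.Dict.get? pvVV current_field with
    | some vals =>
        let best := pvPick (fun v => PySem.Str.startswith raw_value v) vals ""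
        if best ≠ "" then
          (best, PySem.Str.strip (PySem.Str.slice raw_value (some (PySem.Str.len best)) none))
        else pvDetectB raw_value next_field
    | none => pvDetectB raw_value next_field

-- ===== PRECONDITION & SPEC =====
def Spec_split_merged_value_py (raw_value : String) (current_field : String) (next_field : Option String) (out : String × String) : Prop := out = split_merged_value_py_alt raw_value current_field next_field
instance (raw_value : String) (current_field : String) (next_field : Option String) (out : String × String) : Decidable (Spec_split_merged_value_py raw_value current_field next_field out) := by unfold Spec_split_merged_value_py; infer_instance

-- ===== CLAIM (what is proved, stated in full; the proofs are below) =====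
def Claim_equal_split_merged_value_py : Prop := ∀ (raw_value : String) (current_field : String) (next_field : Option String), Dom_split_merged_value_py raw_value current_field next_field → Spec_split_merged_value_py raw_value current_field next_field (split_merged_value_py raw_value current_field next_field)

-- ===== LEMMAS AND PROOFS =====

lemma pv_insertBy_cons (b : String → String → Bool) (x y : String) (ys : List String) :
    PySem.List.insertBy b x (y :: ys)
      = if b x y then x :: y :: ys else y :: PySem.List.insertBy b x ys := by
  by_cases h : b x y <;> simp [PySem.List.insertBy, h]

-- the first p-true element of (insertBy x M), for a descending-by-length-sorted M
lemma pv_find?_insertBy (p : String → Bool) (x : String) (M : List String)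
    (hM : M.Pairwise (fun a b => PySem.Str.len b ≤ PySem.Str.len a)) :
    List.find? p (PySem.List.insertBy (fun a b => decide (PySem.Str.len b < PySem.Str.len a)) x M)
      = match List.find? p M with
        | some w => if p x && decide (PySem.Str.len w < PySem.Str.len x) then some x else some w
        | none => if p x then some x else none := by
  induction M with
  | nil =>
      cases hp : p x <;> simp [PySem.List.insertBy, List.find?, hp]
  | cons y ys ih =>
      rcases List.pairwise_cons.mp hM with ⟨hy, hys⟩
      rw [pv_insertBy_cons]
      by_cases hxy : PySem.Str.len y < PySem.Str.len x
      · rw [if_pos (by simpa using hxy)]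
        cases hp : p x
        · rw [List.find?_cons_of_neg (by simp [hp])]
          cases hfind : List.find? p (y :: ys) <;> simp
        · rw [List.find?_cons_of_pos hp]
          cases hfind : List.find? p (y :: ys) with
          | none => simp
          | some w =>
              have hw : w ∈ y :: ys := List.mem_of_find?_eq_some hfind
              have hwlen : PySem.Str.len w ≤ PySem.Str.len y := by
                rcases List.mem_cons.mp hw with rfl | hw'
                · exact le_refl _
                · exact hy w hw'
              have hwx : PySem.Str.len w < PySem.Str.len x := lt_of_le_of_lt hwlen hxy
              have hwx2 : w.length < x.length := by simpa [PySem.Str.len_eq] using hwx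
              simp
              intro habs
              exact absurd habs (by omega)
      · rw [if_neg (by simpa using hxy)]
        cases hpy : p y
        · rw [List.find?_cons_of_neg (by simp [hpy]), List.find?_cons_of_neg (by simp [hpy]),
            ih hys]
        · rw [List.find?_cons_of_pos hpy, List.find?_cons_of_pos hpy]
          have hxy2 : ¬ y.length < x.length := by simpa [PySem.Str.len_eq] using hxy
          simp
          exact fun _ h => absurd h hxy2

lemma pv_pick_append (p : String → Bool) (L1 L2 : List String) (b : String) :
    pvPick p (L1 ++ L2) b = pvPick p L2 (pvPick p L1 b) := by
  induction L1 generalizing b with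
  | nil => simp [pvPick]
  | cons v vs ih => simp [pvPick, ih]

lemma pv_sortR_snoc (L : List String) (x : String) :
    PySem.List.sorted (L ++ [x]) (fun v => PySem.Str.len v) true
      = PySem.List.insertBy (fun a b => decide (PySem.Str.len b < PySem.Str.len a)) x
          (PySem.List.sorted L (fun v => PySem.Str.len v) true) := by
  rw [PySem.List.sorted_rev_eq_foldl_insertBy, PySem.List.sorted_rev_eq_foldl_insertBy,
    List.foldl_append]
  rfl

-- CRUX: scanning the stable descending sort for the first match picks exactly the
-- longest matching element (first in original order among equal lengths).
lemma pv_crux (p : String → Bool) (L : List String) (h : "" ∉ L) :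
    List.find? p (PySem.List.sorted L (fun v => PySem.Str.len v) true)
      = (if pvPick p L "" = "" then none else some (pvPick p L "")) := by
  induction L using List.reverseRecOn with
  | nil => rfl
  | append_singleton L x ih =>
      have hx : x ≠ "" := by intro hx; exact h (by simp [hx])
      have hL : "" ∉ L := fun hm => h (by simp [hm])
      rw [pv_sortR_snoc,
        pv_find?_insertBy p x _ (PySem.List.sorted_pairwise_rev L (fun v => PySem.Str.len v)),
        ih hL, pv_pick_append]
      simp only [pvPick]
      by_cases hb : pvPick p L "" = ""
      · rw [hb]
        cases hp : p x
        · simp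
        · simp [hx]
      · simp only [if_neg hb]
        cases hp : p x
        · simp [hb]
        · by_cases hc : PySem.Str.len (pvPick p L "") < PySem.Str.len x
          · have hc2 : (pvPick p L "").length < x.length := by
              simpa [PySem.Str.len_eq] using hc
            simp [hc2, hx]
          · have hc2 : ¬ (pvPick p L "").length < x.length := by
              simpa [PySem.Str.len_eq] using hc
            simp [hc2, hb]

lemma pv_vv_no_empty (k : String) (vals : List String)
    (h : PySem.Dict.get? pvVV k = some vals) : "" ∉ vals := by
  have h2 := PySem.Dict.mem_items_of_get?_eq_some pvVV h
  simp only [pvVV, List.mem_cons, List.not_mem_nil, or_false, Prod.mk.injEq] at h2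
  rcases h2 with ⟨_, rfl⟩ | ⟨_, rfl⟩ | ⟨_, rfl⟩ | ⟨_, rfl⟩ | ⟨_, rfl⟩ | ⟨_, rfl⟩ | ⟨_, rfl⟩ <;>
    decide

lemma pv_loop1A_char (raw : String) (M : List String) :
    pvLoop1A raw M
      = match List.find? (fun v => PySem.Str.startswith raw v) M with
        | some v => (v, PySem.Str.strip (PySem.Str.slice raw (some (PySem.Str.len v)) none))
        | none => ("", raw) := by
  induction M with
  | nil => rfl
  | cons v vs ih =>
      cases hs : PySem.Str.startswith raw v
      · have hs2 : PySem.Chars.startswith raw.toList v.toList = false := by simpa using hs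
        rw [List.find?_cons_of_neg (by simp only [hs]; exact Bool.false_ne_true)]
        simp [pvLoop1A, hs2, ih]
      · have hs2 : PySem.Chars.startswith raw.toList v.toList = true := by simpa using hs
        rw [List.find?_cons_of_pos (by simp only [hs])]
        simp [pvLoop1A, hs2]

lemma pv_loop2A_char (raw : String) (M : List String) :
    pvLoop2A raw M
      = match List.find? (fun v => PySem.Str.isIn v raw && decide (PySem.Str.find raw v > 0)) M with
        | some v =>
            (PySem.Str.strip (PySem.Str.slice raw none (some (PySem.Str.find raw v))),
             PySem.Str.strip (PySem.Str.slice raw (some (PySem.Str.find raw v)) none))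
        | none => (raw, "") := by
  induction M with
  | nil => rfl
  | cons v vs ih =>
      cases hin : PySem.Str.isIn v raw
      · have hin2 : PySem.Chars.isIn v.toList raw.toList = false := by simpa using hin
        rw [List.find?_cons_of_neg
          (by simp only [hin, Bool.false_and]; exact Bool.false_ne_true)]
        simp [pvLoop2A, hin2, ih]
      · by_cases hidx : PySem.Str.find raw v > 0
        · have hin2 : PySem.Chars.isIn v.toList raw.toList = true := by simpa using hin
          rw [List.find?_cons_of_pos
            (by simp only [hin, Bool.true_and, decide_eq_true_eq]; exact hidx)]
          have hidx2 : PySem.Chars.find raw.toList v.toList > 0 := by simpa using hidx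
          simp [pvLoop2A, hin2, hidx2]
        · have hin2 : PySem.Chars.isIn v.toList raw.toList = true := by simpa using hin
          rw [List.find?_cons_of_neg
            (by simp only [hin, Bool.true_and, decide_eq_true_eq]; exact hidx)]
          have hidx2 : ¬ PySem.Chars.find raw.toList v.toList > 0 := by simpa using hidx
          simp [pvLoop2A, hin2, hidx2, ih]

lemma pv_detect_eq (raw : String) (nf : Option String) :
    pvDetectA raw nf = pvDetectB raw nf := by
  cases nf with
  | none => rfl
  | some nfv =>
      by_cases hnf : nfv = ""
      · simp [pvDetectA, pvDetectB, hnf]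
      · cases hvv : PySem.Dict.get? pvVV nfv with
        | none => simp [pvDetectA, pvDetectB, hnf, hvv]
        | some nvals =>
            have hne := pv_vv_no_empty nfv nvals hvv
            simp only [pvDetectA, pvDetectB, hvv, if_pos (show nfv ≠ "" from hnf)]
            rw [pv_loop2A_char,
              pv_crux (fun v => PySem.Str.isIn v raw && decide (PySem.Str.find raw v > 0)) nvals hne]
            set b := pvPick (fun v => PySem.Str.isIn v raw && decide (PySem.Str.find raw v > 0)) nvals "" with hbdef
            by_cases hb : b = "" <;> simp [hb]

-- ===== VERDICT (by name: the statement is the Claim_ definition above) =====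
theorem split_merged_value_py_spec : Claim_equal_split_merged_value_py := by
  intro raw cf nf _
  unfold Spec_split_merged_value_py split_merged_value_py split_merged_value_py_alt
  by_cases hraw : raw = ""
  · simp [hraw]
  · simp only [if_neg hraw]
    cases hvv : PySem.Dict.get? pvVV cf with
    | none => exact pv_detect_eq raw nf
    | some vals =>
        have hne := pv_vv_no_empty cf vals hvv
        dsimp only
        rw [pv_loop1A_char, pv_crux (fun v => PySem.Str.startswith raw v) vals hne]
        set b := pvPick (fun v => PySem.Str.startswith raw v) vals "" with hbdef
        by_cases hb : b = "" <;> simp [hb, pv_detect_eq]
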